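-- pv_equiv track=rewrite | github.com/jdanray/leetcode | minimumBuckets.py | minimumBuckets
-- ===== SOURCE A (Python) =====
-- def minimumBuckets(street):
-- 	N = len(street)
--
-- 	covered = -1
-- 	res = 0
-- 	for i, s in enumerate(street):
-- 		if s == '.' or i == covered:
-- 			continue
--
-- 		if i + 1 < N and street[i + 1] == '.':
-- 			res += 1
-- 			if i + 2 < N and street[i + 2] == 'H':
-- 				covered = i + 2
-- 		elif i - 1 >= 0 and street[i - 1] == '.':
-- 			res += 1
-- 		else:
-- 			return -1
--
-- 	return res
-- ===== SOURCE B (Python) =====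
-- def minimumBuckets(street):
-- 	# Two staged passes instead of A's single greedy pass with a 'covered'
-- 	# sentinel: (1) a validity scan (every house, i.e. non-'.' char, needs
-- 	# an adjacent '.'), (2) the closed-form count: #houses minus the number
-- 	# of greedy non-overlapping "<house>.H" matches (each shares one bucket).
-- 	n = len(street)
-- 	for i, c in enumerate(street):
-- 		if c != '.' and not ((i > 0 and street[i - 1] == '.')
-- 				or (i + 1 < n and street[i + 1] == '.')):
-- 			return -1
-- 	pairs = 0
-- 	i = 0
-- 	while i + 3 <= n:
-- 		if street[i] != '.' and street[i + 1] == '.' and street[i + 2] == 'H':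
-- 			pairs += 1
-- 			i += 3
-- 		else:
-- 			i += 1
-- 	return (n - street.count('.')) - pairs
-- ===== Notes on version B (the rewrite author's own statement) =====
-- stated objective: alternative
-- what changed: Replaces A's single greedy pass with a covered-sentinel index by two staged passes: a validity scan checking every house (non-dot char) has an adjacent dot, then the closed-form count of houses minus the number of greedy non-overlapping house-dot-H triples.
import Mathlib
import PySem

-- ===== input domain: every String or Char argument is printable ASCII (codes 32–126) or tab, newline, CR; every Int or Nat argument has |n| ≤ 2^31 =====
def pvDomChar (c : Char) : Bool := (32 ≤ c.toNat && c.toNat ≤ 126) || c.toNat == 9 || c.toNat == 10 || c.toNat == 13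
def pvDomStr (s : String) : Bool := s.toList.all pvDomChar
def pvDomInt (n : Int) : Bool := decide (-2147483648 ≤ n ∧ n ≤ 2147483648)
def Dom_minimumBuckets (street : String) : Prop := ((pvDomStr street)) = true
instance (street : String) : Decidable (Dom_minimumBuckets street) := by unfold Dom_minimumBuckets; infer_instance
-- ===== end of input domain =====

-- B replaces A's single greedy pass with a 'covered' sentinel by two staged passes:
-- a validity scan plus the closed-form count #houses − #greedy "<house>.H" matches
-- (objective: alternative).

-- ===== PORT A =====
-- the 'for i, s in enumerate(street)' loop: walks the remaining characters with
-- the running index i; street[i±k] accesses are via PySem.List.pyGet? (exact)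
def aGo (cs : List Char) (N : Int) : List Char → Nat → Int → Int → Int
  | [], _, _, res => res
  | s :: rest, i, covered, res =>
    if s = '.' ∨ (i : Int) = covered then
      aGo cs N rest (i + 1) covered res
    else if (i : Int) + 1 < N ∧ PySem.List.pyGet? cs ((i : Int) + 1) = some '.' then
      if (i : Int) + 2 < N ∧ PySem.List.pyGet? cs ((i : Int) + 2) = some 'H' then
        aGo cs N rest (i + 1) ((i : Int) + 2) (res + 1)
      else
        aGo cs N rest (i + 1) covered (res + 1)
    else if (i : Int) - 1 ≥ 0 ∧ PySem.List.pyGet? cs ((i : Int) - 1) = some '.' then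
      aGo cs N rest (i + 1) covered (res + 1)
    else
      -1

def minimumBuckets (street : String) : Int :=
  let cs := street.toList
  aGo cs (cs.length : Int) cs 0 (-1) 0

-- ===== PORT B =====
-- Source B's validity loop ('for i, c in enumerate(street)'): every street[j]
-- access in Source B is guarded by a bounds test, so List.getD is exact here
def vGo (cs : List Char) (n : Nat) : List Char → Nat → Bool
  | [], _ => true
  | c :: rest, i =>
    if c ≠ '.' ∧ ¬((0 < i ∧ cs.getD (i - 1) ' ' = '.') ∨ (i + 1 < n ∧ cs.getD (i + 1) ' ' = '.')) then
      false
    else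
      vGo cs n rest (i + 1)

-- Source B's 'while i + 3 <= n' pair scanner; under that guard the three indexed
-- reads are in range, so List.getD is exact
def pGo (cs : List Char) (n : Nat) (i : Nat) : Nat :=
  if i + 3 ≤ n then
    if cs.getD i ' ' ≠ '.' ∧ cs.getD (i + 1) ' ' = '.' ∧ cs.getD (i + 2) ' ' = 'H' then
      1 + pGo cs n (i + 3)
    else
      pGo cs n (i + 1)
  else 0
termination_by n - i
decreasing_by all_goals omega

-- 'n - street.count('.') - pairs'; street.count('.') is List.count on the chars
def minimumBuckets_alt (street : String) : Int :=
  let cs := street.toList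
  let n := cs.length
  if vGo cs n cs 0 then ((n : Int) - (cs.count '.' : Int)) - (pGo cs n 0 : Int) else -1

-- ===== PRECONDITION & SPEC =====
def Spec_minimumBuckets (street : String) (out : Int) : Prop := out = minimumBuckets_alt street
instance (street : String) (out : Int) : Decidable (Spec_minimumBuckets street out) := by unfold Spec_minimumBuckets; infer_instance

-- ===== CLAIM (what is proved, stated in full; the proofs are below) =====
def Claim_equal_minimumBuckets : Prop := ∀ (street : String), Dom_minimumBuckets street → Spec_minimumBuckets street (minimumBuckets street)

-- ===== LEMMAS AND PROOFS =====

-- proof-only intermediate: A's pass rephrased as a stride-1/2/3 recursion with a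
-- previous-char-was-dot flag (bridges A's 'covered' sentinel to B's formula)
def refGo (cs : List Char) (n : Nat) (i : Nat) (prevDot : Bool) (res : Int) : Int :=
  if h : i < n then
    if cs.getD i ' ' = '.' then
      refGo cs n (i + 1) true res
    else if i + 1 < n ∧ cs.getD (i + 1) ' ' = '.' then
      if i + 2 < n ∧ cs.getD (i + 2) ' ' = 'H' then
        refGo cs n (i + 3) false (res + 1)
      else
        refGo cs n (i + 2) true (res + 1)
    else if prevDot then
      refGo cs n (i + 1) false (res + 1)
    else
      -1
  else
    res
termination_by n - i
decreasing_by all_goals omega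

-- an in-range non-negative Python index reads the same character both ports read
lemma pyGet_at (cs : List Char) (j : Nat) (hj : j < cs.length) (c : Char) :
    PySem.List.pyGet? cs (j : Int) = some c ↔ cs.getD j ' ' = c := by
  rw [PySem.List.pyGet?_natCast, List.getElem?_eq_getElem hj, List.getD_eq_getElem cs ' ' hj]
  simp

lemma main_invariant (cs : List Char) :
    ∀ (k i : Nat) (covered res : Int) (prevDot : Bool),
      cs.length ≤ i + k →
      covered < (i : Int) →
      (prevDot = true ↔ (1 ≤ i ∧ cs.getD (i - 1) ' ' = '.')) →
      aGo cs (cs.length : Int) (cs.drop i) i covered res = refGo cs cs.length i prevDot res := by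
  intro k
  induction k with
  | zero =>
    intro i covered res prevDot hlen _ _
    rw [List.drop_eq_nil_of_le (by omega), refGo]
    simp [aGo, Nat.not_lt.mpr (by omega : cs.length ≤ i)]
  | succ k ih =>
    intro i covered res prevDot hlen hcov hprev
    by_cases hi : i < cs.length
    · rw [← List.getElem_cons_drop hi]
      rw [refGo]
      rw [dif_pos hi]
      have hgetD : cs.getD i ' ' = cs[i] := List.getD_eq_getElem cs ' ' hi
      by_cases hdot : cs[i] = '.'
      · -- current char is '.'
        rw [aGo, if_pos (Or.inl hdot), if_pos (hgetD.trans hdot)]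
        exact ih (i + 1) covered res true (by omega) (by omega)
          (by rw [Nat.add_sub_cancel, hgetD, hdot]; simp)
      · have hA1 : ¬(cs[i] = '.' ∨ (i : Int) = covered) := by
          rintro (h | h); exact hdot h; omega
        have hB1 : ¬(cs.getD i ' ' = '.') := by rw [hgetD]; exact hdot
        rw [aGo, if_neg hA1, if_neg hB1]
        -- right-neighbour condition is the same on both sides
        have hR : ((i : Int) + 1 < (cs.length : Int) ∧
              PySem.List.pyGet? cs ((i : Int) + 1) = some '.') ↔
            (i + 1 < cs.length ∧ cs.getD (i + 1) ' ' = '.') := by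
          constructor
          · rintro ⟨hb, hv⟩
            have hb' : i + 1 < cs.length := by exact_mod_cast hb
            refine ⟨hb', ?_⟩
            rw [← pyGet_at cs (i + 1) hb' '.']
            rw [← hv]; norm_cast
          · rintro ⟨hb, hv⟩
            refine ⟨by exact_mod_cast hb, ?_⟩
            have := (pyGet_at cs (i + 1) hb '.').mpr hv
            rw [← this]; norm_cast
        by_cases hr : i + 1 < cs.length ∧ cs.getD (i + 1) ' ' = '.'
        · rw [if_pos (hR.mpr hr), if_pos hr]
          have hr1 : cs[i + 1] = '.' := by
            rw [← List.getD_eq_getElem cs ' ' hr.1]; exact hr.2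
          have hC : ((i : Int) + 2 < (cs.length : Int) ∧
                PySem.List.pyGet? cs ((i : Int) + 2) = some 'H') ↔
              (i + 2 < cs.length ∧ cs.getD (i + 2) ' ' = 'H') := by
            constructor
            · rintro ⟨hb, hv⟩
              have hb' : i + 2 < cs.length := by exact_mod_cast hb
              refine ⟨hb', ?_⟩
              rw [← pyGet_at cs (i + 2) hb' 'H', ← hv]; norm_cast
            · rintro ⟨hb, hv⟩
              refine ⟨by exact_mod_cast hb, ?_⟩
              have := (pyGet_at cs (i + 2) hb 'H').mpr hv
              rw [← this]; norm_cast
          by_cases hc : i + 2 < cs.length ∧ cs.getD (i + 2) ' ' = 'H'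
          · -- bucket right, next-next house covered: A takes 3 single steps, refGo one stride-3 step
            rw [if_pos (hC.mpr hc), if_pos hc]
            have hc2 : cs[i + 2] = 'H' := by
              rw [← List.getD_eq_getElem cs ' ' hc.1]; exact hc.2
            rw [← List.getElem_cons_drop hr.1, aGo, if_pos (Or.inl hr1)]
            rw [← List.getElem_cons_drop hc.1, aGo,
              if_pos (Or.inr (by push_cast; ring))]
            have : i + 1 + 1 + 1 = i + 3 := by omega
            rw [this]
            exact ih (i + 3) ((i : Int) + 2) (res + 1) false (by omega) (by push_cast; omega)
              (by rw [show i + 3 - 1 = i + 2 from by omega, List.getD_eq_getElem cs ' ' hc.1, hc2]; simp)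
          · -- bucket right, no coverage: A takes 2 single steps, refGo one stride-2 step
            rw [if_neg (fun h => hc (hC.mp h)), if_neg hc]
            rw [← List.getElem_cons_drop hr.1, aGo, if_pos (Or.inl hr1)]
            have : i + 1 + 1 = i + 2 := by omega
            rw [this]
            exact ih (i + 2) covered (res + 1) true (by omega) (by omega)
              (by rw [show i + 2 - 1 = i + 1 from by omega, List.getD_eq_getElem cs ' ' hr.1, hr1]; simp)
        · rw [if_neg (fun h => hr (hR.mp h)), if_neg hr]
          -- left-neighbour condition of A is exactly the prev-dot flag
          have hL : ((i : Int) - 1 ≥ 0 ∧ PySem.List.pyGet? cs ((i : Int) - 1) = some '.') ↔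
              prevDot = true := by
            rw [hprev]
            constructor
            · rintro ⟨hb, hv⟩
              have h1 : 1 ≤ i := by omega
              have hij : ((i - 1 : Nat) : Int) = (i : Int) - 1 := by omega
              refine ⟨h1, (pyGet_at cs (i - 1) (by omega) '.').mp ?_⟩
              rw [hij, hv]
            · rintro ⟨h1, hv⟩
              have hij : ((i - 1 : Nat) : Int) = (i : Int) - 1 := by omega
              refine ⟨by omega, ?_⟩
              rw [← hij]
              exact (pyGet_at cs (i - 1) (by omega) '.').mpr hv
          by_cases hp : prevDot = true
          · rw [if_pos (hL.mpr hp), if_pos hp]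
            exact ih (i + 1) covered (res + 1) false (by omega) (by omega)
              (by rw [Nat.add_sub_cancel, hgetD]; simp [hdot])
          · rw [if_neg (fun h => hp (hL.mp h)), if_neg hp]
    · rw [List.drop_eq_nil_of_le (by omega), refGo]
      simp [aGo, hi]

-- the pair scanner steps by one whenever position i does not match "<house>.H"
lemma pGo_skip (cs : List Char) (n i : Nat)
    (h : ¬(i + 3 ≤ n ∧ cs.getD i ' ' ≠ '.' ∧ cs.getD (i + 1) ' ' = '.' ∧ cs.getD (i + 2) ' ' = 'H')) :
    pGo cs n i = pGo cs n (i + 1) := by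
  rw [pGo]
  by_cases h3 : i + 3 ≤ n
  · rw [if_pos h3, if_neg (fun hm => h ⟨h3, hm⟩)]
  · rw [if_neg h3, pGo, if_neg (by omega)]

-- refGo equals B's staged formula: validity scan, then #houses minus greedy pair matches
lemma formula_invariant (cs : List Char) :
    ∀ (k i : Nat) (res : Int) (prevDot : Bool),
      cs.length ≤ i + k →
      (prevDot = true ↔ (1 ≤ i ∧ cs.getD (i - 1) ' ' = '.')) →
      refGo cs cs.length i prevDot res =
        if vGo cs cs.length (cs.drop i) i then
          res + (List.countP (fun c => !(c == '.')) (cs.drop i) : Int) - (pGo cs cs.length i : Int)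
        else -1 := by
  intro k
  induction k with
  | zero =>
    intro i res prevDot hlen _
    have hp0 : pGo cs cs.length i = 0 := by
      rw [pGo, if_neg (by omega)]
    rw [List.drop_eq_nil_of_le (by omega), refGo, dif_neg (by omega), vGo, hp0]
    simp
  | succ k ih =>
    intro i res prevDot hlen hprev
    by_cases hi : i < cs.length
    · have hcons : cs.drop i = cs[i] :: cs.drop (i + 1) := (List.getElem_cons_drop hi).symm
      have hgetD : cs.getD i ' ' = cs[i] := List.getD_eq_getElem cs ' ' hi
      rw [refGo, dif_pos hi]
      by_cases hdot : cs[i] = '.'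
      · -- '.' : stride 1, no house, no match
        have hV : vGo cs cs.length (cs.drop i) i = vGo cs cs.length (cs.drop (i + 1)) (i + 1) := by
          rw [hcons, vGo, if_neg (by simp [hdot])]
        have hCnt : List.countP (fun c => !(c == '.')) (cs.drop i) =
            List.countP (fun c => !(c == '.')) (cs.drop (i + 1)) := by
          rw [hcons, List.countP_cons]; simp [hdot]
        have hP : pGo cs cs.length i = pGo cs cs.length (i + 1) :=
          pGo_skip cs cs.length i (by rw [hgetD, hdot]; simp)
        rw [if_pos (hgetD.trans hdot),
          ih (i + 1) res true (by omega) (by rw [Nat.add_sub_cancel, hgetD, hdot]; simp),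
          hV, hCnt, hP]
      · have hB1 : ¬(cs.getD i ' ' = '.') := by rw [hgetD]; exact hdot
        rw [if_neg hB1]
        by_cases hr : i + 1 < cs.length ∧ cs.getD (i + 1) ' ' = '.'
        · rw [if_pos hr]
          have hok : ¬(cs[i] ≠ '.' ∧
              ¬((0 < i ∧ cs.getD (i - 1) ' ' = '.') ∨
                (i + 1 < cs.length ∧ cs.getD (i + 1) ' ' = '.'))) := by
            rintro ⟨_, hno⟩; exact hno (Or.inr hr)
          have hcons1 : cs.drop (i + 1) = cs[i + 1] :: cs.drop (i + 2) :=
            (List.getElem_cons_drop hr.1).symm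
          have hr1 : cs[i + 1] = '.' := by
            rw [← List.getD_eq_getElem cs ' ' hr.1]; exact hr.2
          have hv1 : vGo cs cs.length (cs.drop i) i = vGo cs cs.length (cs.drop (i + 1)) (i + 1) := by
            rw [hcons, vGo, if_neg hok]
          have hv2 : vGo cs cs.length (cs.drop (i + 1)) (i + 1) =
              vGo cs cs.length (cs.drop (i + 2)) (i + 2) := by
            rw [hcons1, vGo, if_neg (by simp [hr1])]
          by_cases hc : i + 2 < cs.length ∧ cs.getD (i + 2) ' ' = 'H'
          · -- "<house>.H": stride 3, two houses, one pair match
            rw [if_pos hc]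
            have hcons2 : cs.drop (i + 2) = cs[i + 2] :: cs.drop (i + 3) :=
              (List.getElem_cons_drop hc.1).symm
            have hc2 : cs[i + 2] = 'H' := by
              rw [← List.getD_eq_getElem cs ' ' hc.1]; exact hc.2
            have hv3 : vGo cs cs.length (cs.drop (i + 2)) (i + 2) =
                vGo cs cs.length (cs.drop (i + 3)) (i + 3) := by
              rw [hcons2, vGo, if_neg ?_]
              rintro ⟨_, hno⟩
              exact hno (Or.inl ⟨by omega, hr.2⟩)
            have hCnt : List.countP (fun c => !(c == '.')) (cs.drop i) =
                2 + List.countP (fun c => !(c == '.')) (cs.drop (i + 3)) := by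
              rw [hcons, hcons1, hcons2]
              simp [List.countP_cons, hdot, hr1, hc2]
              omega
            have hP : pGo cs cs.length i = 1 + pGo cs cs.length (i + 3) := by
              rw [pGo, if_pos (by omega), if_pos ⟨hB1, hr.2, hc.2⟩]
            rw [ih (i + 3) (res + 1) false (by omega)
                (by rw [show i + 3 - 1 = i + 2 from rfl,
                  List.getD_eq_getElem cs ' ' hc.1, hc2]; simp),
              hv1, hv2, hv3, hCnt, hP]
            split_ifs
            · push_cast; ring
            · rfl
          · -- "<house>." not followed by 'H': stride 2, one house, no match
            rw [if_neg hc]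
            have hCnt : List.countP (fun c => !(c == '.')) (cs.drop i) =
                1 + List.countP (fun c => !(c == '.')) (cs.drop (i + 2)) := by
              rw [hcons, hcons1]
              simp [List.countP_cons, hdot, hr1]
              omega
            have hP : pGo cs cs.length i = pGo cs cs.length (i + 2) := by
              rw [pGo_skip cs cs.length i (by rintro ⟨h3, _, _, hH⟩; exact hc ⟨by omega, hH⟩),
                pGo_skip cs cs.length (i + 1) (by rintro ⟨_, hne, _, _⟩; exact hne hr.2)]
            rw [ih (i + 2) (res + 1) true (by omega)
                (by rw [show i + 2 - 1 = i + 1 from rfl,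
                  List.getD_eq_getElem cs ' ' hr.1, hr1]; simp),
              hv1, hv2, hCnt, hP]
            split_ifs
            · push_cast; ring
            · rfl
        · rw [if_neg hr]
          by_cases hp : prevDot = true
          · -- left bucket: stride 1, one house, no match
            rw [if_pos hp]
            have hleft := hprev.mp hp
            have hV : vGo cs cs.length (cs.drop i) i =
                vGo cs cs.length (cs.drop (i + 1)) (i + 1) := by
              rw [hcons, vGo, if_neg ?_]
              rintro ⟨_, hno⟩
              exact hno (Or.inl ⟨by omega, hleft.2⟩)
            have hCnt : List.countP (fun c => !(c == '.')) (cs.drop i) =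
                1 + List.countP (fun c => !(c == '.')) (cs.drop (i + 1)) := by
              rw [hcons, List.countP_cons]
              have hb : (!(cs[i] == '.')) = true := by simp [hdot]
              simp [hb]
              omega
            have hP : pGo cs cs.length i = pGo cs cs.length (i + 1) :=
              pGo_skip cs cs.length i (by rintro ⟨h3, _, hm, _⟩; exact hr ⟨by omega, hm⟩)
            rw [ih (i + 1) (res + 1) false (by omega)
                (by rw [Nat.add_sub_cancel, hgetD]; simp [hdot]),
              hV, hCnt, hP]
            split_ifs
            · push_cast; ring
            · rfl
          · -- invalid house: both sides give -1
            rw [if_neg hp]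
            have hV : vGo cs cs.length (cs.drop i) i = false := by
              rw [hcons, vGo, if_pos ?_]
              refine ⟨hdot, ?_⟩
              rintro (hl | hrr)
              · exact hp (hprev.mpr ⟨by omega, hl.2⟩)
              · exact hr hrr
            rw [hV]
            simp
    · have hp0 : pGo cs cs.length i = 0 := by
        rw [pGo, if_neg (by omega)]
      rw [List.drop_eq_nil_of_le (by omega), refGo, dif_neg (by omega), vGo, hp0]
      simp

-- #houses + #dots = length
lemma houses_eq (cs : List Char) :
    List.countP (fun c => !(c == '.')) cs + cs.count '.' = cs.length := by
  induction cs with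
  | nil => simp
  | cons c t ih =>
    by_cases h : c = '.' <;>
      simp [List.countP_cons, List.count_cons, h] <;> omega

-- ===== VERDICT (by name: the statement is the Claim_ definition above) =====
theorem minimumBuckets_spec : Claim_equal_minimumBuckets := by
  intro street _
  unfold Spec_minimumBuckets minimumBuckets minimumBuckets_alt
  have h1 := main_invariant street.toList street.toList.length 0 (-1) 0 false
    (by omega) (by omega) (by simp)
  have h2 := formula_invariant street.toList street.toList.length 0 0 false
    (by omega) (by simp)
  simp only [List.drop_zero] at h1 h2
  simp only [h1, h2]
  have h3 := houses_eq street.toList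
  split_ifs
  · omega
  · rfl
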